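-- pv_equiv track=rewrite | github.com/MrBrantCode/unitest_baseline | mut_generate/mist_train_cf/cf_35108/solution.py | maximize_starting_index
-- ===== SOURCE A (Python) =====
-- from typing import List
--
-- def maximize_starting_index(scores: List[int]) -> int:
--     n = len(scores)
--     if n < 2:
--         return 0
--
--     max_score = float('-inf')
--     start_index = 0
--
--     for i in range(n - 2, -1, -1):
--         score1 = scores[i]
--         score2 = scores[i + 1]
--         total_score = score1 + score2
--         j = i + 2
--         while j < n:
--             score1, score2 = score2, total_score
--             total_score = score1 + score2
--             j += 1
--         if total_score > max_score:
--             max_score = total_score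
--             start_index = i
--
--     return start_index
-- ===== SOURCE B (Python) =====
-- from typing import List
--
-- def maximize_starting_index(scores: List[int]) -> int:
--     # One pass: maintain the Fibonacci coefficients (p, q) so that the
--     # total reached from start i is p*scores[i] + q*scores[i+1]; no inner loop.
--     n = len(scores)
--     if n < 2:
--         return 0
--     p, q = 1, 1
--     best_val = None
--     best_i = 0
--     for i in range(n - 2, -1, -1):
--         val = p * scores[i] + q * scores[i + 1]
--         if best_val is None or val > best_val:
--             best_val = val
--             best_i = i
--         p, q = q, p + q
--     return best_i
-- ===== Notes on version B (the rewrite author's own statement) =====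
-- stated objective: faster
-- what changed: Replaced the O(n) inner while-loop that re-simulates the Fibonacci-like recurrence for every start index by a single pass that carries the Fibonacci coefficient pair (p,q), so each start's total is p*scores[i]+q*scores[i+1] in O(1).
import Mathlib
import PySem

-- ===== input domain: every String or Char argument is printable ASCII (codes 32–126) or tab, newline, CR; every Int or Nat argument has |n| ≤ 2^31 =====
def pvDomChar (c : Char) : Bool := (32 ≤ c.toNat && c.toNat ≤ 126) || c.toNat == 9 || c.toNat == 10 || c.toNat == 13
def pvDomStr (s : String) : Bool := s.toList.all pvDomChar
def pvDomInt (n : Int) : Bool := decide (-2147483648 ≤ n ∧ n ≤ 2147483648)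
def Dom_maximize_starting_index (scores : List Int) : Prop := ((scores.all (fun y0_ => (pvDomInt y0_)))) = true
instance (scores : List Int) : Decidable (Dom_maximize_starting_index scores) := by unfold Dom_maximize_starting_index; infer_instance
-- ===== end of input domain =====

-- B replaces A's inner while-loop (which re-simulates the recurrence from every
-- start index) by a carried pair of Fibonacci coefficients, one step per index.

-- ===== PORT A =====
-- the `while j < n` loop of A, run on fuel k = n - j (j only increments towards n, so exact);
-- state: score2 and total_score (score1 is only ever read as the previous score2)
def pvAWhile : Nat → Int → Int → Int
  | 0, _, total => total
  | k + 1, s2, total => pvAWhile k total (s2 + total)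

-- one iteration of A's `for i in range(n-2, -1, -1)` loop; state (max_score, start_index);
-- max_score starts at float('-inf'), modelled as Option Int with none = -inf (always exceeded)
def pvABody (scores : List Int) (n : Nat) (st : Option Int × Int) (i : Int) : Option Int × Int :=
  let score1 := PySem.List.pyGetD scores i 0
  let score2 := PySem.List.pyGetD scores (i + 1) 0
  let total := pvAWhile (n - (i.toNat + 2)) score2 (score1 + score2)
  match st.1 with
  | none => (some total, i)
  | some m => if total > m then (some total, i) else st

def maximize_starting_index (scores : List Int) : Int :=
  let n := scores.length
  if n < 2 then 0
  else ((PySem.List.pyRange ((n : Int) - 2) (-1) (-1)).foldl (pvABody scores n) (none, 0)).2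

-- ===== PORT B =====
-- one iteration of B's loop; state (p, q, best_val, best_i); best_val None = no value yet
def pvBBody (scores : List Int) (st : Int × Int × Option Int × Int) (i : Int) :
    Int × Int × Option Int × Int :=
  let p := st.1
  let q := st.2.1
  let v := p * PySem.List.pyGetD scores i 0 + q * PySem.List.pyGetD scores (i + 1) 0
  let bst : Option Int × Int :=
    match st.2.2.1 with
    | none => (some v, i)
    | some m => if v > m then (some v, i) else (st.2.2.1, st.2.2.2)
  (q, p + q, bst.1, bst.2)

def maximize_starting_index_alt (scores : List Int) : Int :=
  let n := scores.length
  if n < 2 then 0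
  else ((PySem.List.pyRange ((n : Int) - 2) (-1) (-1)).foldl (pvBBody scores) (1, 1, none, 0)).2.2.2

-- ===== PRECONDITION & SPEC =====
def Spec_maximize_starting_index (scores : List Int) (out : Int) : Prop := out = maximize_starting_index_alt scores
instance (scores : List Int) (out : Int) : Decidable (Spec_maximize_starting_index scores out) := by unfold Spec_maximize_starting_index; infer_instance

-- ===== CLAIM (what is proved, stated in full; the proofs are below) =====
def Claim_equal_maximize_starting_index : Prop := ∀ (scores : List Int), Dom_maximize_starting_index scores → Spec_maximize_starting_index scores (maximize_starting_index scores)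

-- ===== LEMMAS AND PROOFS =====

-- A's inner while-loop computes Fibonacci combinations of its two state entries
theorem pvAWhile_eq_fib (m : Nat) : ∀ a b : Int,
    pvAWhile m a b = (Nat.fib m : Int) * a + (Nat.fib (m + 1) : Int) * b := by
  induction m with
  | zero => intro a b; simp [pvAWhile]
  | succ k ih =>
    intro a b
    rw [pvAWhile, ih, Nat.fib_add_two]
    push_cast
    ring

-- loop correspondence: folding A's body and B's body over the countdown range
-- [cnt-1, ..., 0] agree, provided B's carried pair is (fib (c+1), fib (c+2)) where
-- c = n - 1 - cnt is the number of steps already taken.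
theorem pv_loop_eq (scores : List Int) (n : Nat) (hn : n = scores.length) :
    ∀ (cnt c : Nat) (st : Option Int × Int), c + cnt + 1 = n →
    (PySem.List.pyRange ((cnt : Int) - 1) (-1) (-1)).foldl (pvABody scores n) st
    = ((PySem.List.pyRange ((cnt : Int) - 1) (-1) (-1)).foldl (pvBBody scores)
        ((Nat.fib (c + 1) : Int), (Nat.fib (c + 2) : Int), st.1, st.2)).2.2 := by
  intro cnt
  induction cnt with
  | zero =>
    intro c st hc
    rw [PySem.List.pyRange_neg_one_eq_nil (by norm_num)]
    simp
  | succ k ih =>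
    intro c st hc
    obtain ⟨b1, b2⟩ := st
    have hk1 : ((k + 1 : Nat) : Int) - 1 = (k : Int) := by push_cast; ring
    rw [hk1, PySem.List.pyRange_neg_one_cons (by omega), List.foldl_cons, List.foldl_cons]
    have hnk : n - (((k : Int)).toNat + 2) = c := by simp; omega
    have hv : pvAWhile (n - (((k : Int)).toNat + 2)) (PySem.List.pyGetD scores ((k : Int) + 1) 0)
        (PySem.List.pyGetD scores ((k : Int)) 0 + PySem.List.pyGetD scores ((k : Int) + 1) 0)
        = (Nat.fib (c + 1) : Int) * PySem.List.pyGetD scores ((k : Int)) 0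
          + (Nat.fib (c + 2) : Int) * PySem.List.pyGetD scores ((k : Int) + 1) 0 := by
      rw [hnk, pvAWhile_eq_fib, Nat.fib_add_two]
      push_cast
      ring
    have hf : (Nat.fib (c + 1) : Int) + (Nat.fib (c + 2) : Int) = (Nat.fib (c + 1 + 2) : Int) := by
      exact_mod_cast (Nat.fib_add_two (n := c + 1)).symm
    have hA : pvABody scores n (b1, b2) ((k : Int))
        = (match b1 with
           | none => (some ((Nat.fib (c + 1) : Int) * PySem.List.pyGetD scores ((k : Int)) 0
                      + (Nat.fib (c + 2) : Int) * PySem.List.pyGetD scores ((k : Int) + 1) 0), ((k : Int)))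
           | some m => if (Nat.fib (c + 1) : Int) * PySem.List.pyGetD scores ((k : Int)) 0
                      + (Nat.fib (c + 2) : Int) * PySem.List.pyGetD scores ((k : Int) + 1) 0 > m
                       then (some ((Nat.fib (c + 1) : Int) * PySem.List.pyGetD scores ((k : Int)) 0
                      + (Nat.fib (c + 2) : Int) * PySem.List.pyGetD scores ((k : Int) + 1) 0), ((k : Int)))
                       else (b1, b2)) := by
      simp only [pvABody, hv]
    have hB : pvBBody scores ((Nat.fib (c + 1) : Int), (Nat.fib (c + 2) : Int), b1, b2) ((k : Int))
        = ((Nat.fib (c + 2) : Int), (Nat.fib (c + 1 + 2) : Int),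
           (match b1 with
           | none => (some ((Nat.fib (c + 1) : Int) * PySem.List.pyGetD scores ((k : Int)) 0
                      + (Nat.fib (c + 2) : Int) * PySem.List.pyGetD scores ((k : Int) + 1) 0), ((k : Int)))
           | some m => if (Nat.fib (c + 1) : Int) * PySem.List.pyGetD scores ((k : Int)) 0
                      + (Nat.fib (c + 2) : Int) * PySem.List.pyGetD scores ((k : Int) + 1) 0 > m
                       then (some ((Nat.fib (c + 1) : Int) * PySem.List.pyGetD scores ((k : Int)) 0
                      + (Nat.fib (c + 2) : Int) * PySem.List.pyGetD scores ((k : Int) + 1) 0), ((k : Int)))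
                       else ((b1 : Option Int), b2)).1,
           (match b1 with
           | none => (some ((Nat.fib (c + 1) : Int) * PySem.List.pyGetD scores ((k : Int)) 0
                      + (Nat.fib (c + 2) : Int) * PySem.List.pyGetD scores ((k : Int) + 1) 0), ((k : Int)))
           | some m => if (Nat.fib (c + 1) : Int) * PySem.List.pyGetD scores ((k : Int)) 0
                      + (Nat.fib (c + 2) : Int) * PySem.List.pyGetD scores ((k : Int) + 1) 0 > m
                       then (some ((Nat.fib (c + 1) : Int) * PySem.List.pyGetD scores ((k : Int)) 0
                      + (Nat.fib (c + 2) : Int) * PySem.List.pyGetD scores ((k : Int) + 1) 0), ((k : Int)))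
                       else ((b1 : Option Int), b2)).2) := by
      simp only [pvBBody, hf]
    rw [hA, hB]
    exact ih (c + 1) _ (by omega)

-- ===== VERDICT (by name: the statement is the Claim_ definition above) =====
theorem maximize_starting_index_spec : Claim_equal_maximize_starting_index := by
  intro scores _
  unfold Spec_maximize_starting_index maximize_starting_index maximize_starting_index_alt
  by_cases h : scores.length < 2
  · simp [h]
  · simp only [h, if_false]
    have hcast : ((scores.length - 1 : Nat) : Int) - 1 = (scores.length : Int) - 2 := by
      omega
    have := pv_loop_eq scores scores.length rfl (scores.length - 1) 0 (none, 0) (by omega)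
    rw [hcast] at this
    simp only [this]
    norm_num
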